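-- pv_equiv track=rewrite | github.com/yaekobB/medical-kg-reasoning-pipeline | src/preprocessing/preprocess_large.py | _smart_split_commas
-- ===== SOURCE A (Python) =====
-- from typing import List
--
-- _CONTINUATION_STARTS = {
--     "particularly", "especially", "including", "such", "e.g.", "eg", "i.e.", "ie",
--     "in", "on", "of", "with", "without", "and", "or", "when", "during", "after",
--     "at", "around", "near", "associated", "often", "like", "typically"
-- }
--
-- _TRAILING_PUNCT = " \t\r\n;:.!?"
--
-- def _looks_like_phrase(s: str) -> bool:
--     # phrase-like continuation, not a simple symptom word
--     return len(s.split()) >= 3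
--
-- def _smart_split_commas(text: str) -> List[str]:
--     raw_parts = [p.strip() for p in str(text).split(",")]
--     raw_parts = [p for p in raw_parts if p]
--
--     merged: List[str] = []
--     for part in raw_parts:
--         token0 = part.strip().split(" ", 1)[0].lower()
--
--         is_continuation = (
--             (token0 in _CONTINUATION_STARTS) or
--             (part[:1].islower() and _looks_like_phrase(part))
--         )
--
--         if merged and is_continuation:
--             merged[-1] = merged[-1].rstrip(_TRAILING_PUNCT) + ", " + part
--         else:
--             merged.append(part)
--
--     return merged
-- ===== SOURCE B (Python) =====
-- from typing import List
--
-- _CONTINUATION_STARTS = {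
--     "particularly", "especially", "including", "such", "e.g.", "eg", "i.e.", "ie",
--     "in", "on", "of", "with", "without", "and", "or", "when", "during", "after",
--     "at", "around", "near", "associated", "often", "like", "typically"
-- }
--
-- _TRAILING_PUNCT = " \t\r\n;:.!?"
--
--
-- def _is_continuation(part: str) -> bool:
--     token0 = part.strip().split(" ", 1)[0].lower()
--     return token0 in _CONTINUATION_STARTS or (part[:1].islower() and len(part.split()) >= 3)
--
--
-- def _render(group: List[str]) -> str:
--     # join a forward-ordered group; every element but the last loses trailing punctuation
--     return ", ".join([p.rstrip(_TRAILING_PUNCT) for p in group[:-1]] + group[-1:])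
--
--
-- def _smart_split_commas(text: str) -> List[str]:
--     parts = [p for p in (q.strip() for q in str(text).split(",")) if p]
--     # Build the groups back-to-front: walk the parts right-to-left; a part absorbs the
--     # group to its right when that group's FIRST element is a continuation (the part
--     # itself is never tested — only the overall first part of a group can start one).
--     # rev_groups holds the groups right-to-left, each group's parts right-to-left,
--     # so both growth operations are plain appends.
--     rev_groups: List[List[str]] = []
--     for part in reversed(parts):
--         if rev_groups and _is_continuation(rev_groups[-1][-1]):
--             rev_groups[-1].append(part)
--         else:
--             rev_groups.append([part])
--     return [_render(g[::-1]) for g in reversed(rev_groups)]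
-- ===== Notes on version B (the rewrite author's own statement) =====
-- stated objective: alternative
-- what changed: B builds the groups back-to-front: it walks the parts right-to-left, attaching a part to the group on its right whenever that group's first element is a continuation (the merge test moves from the appended part to the absorbed group's head), then renders each group in a separate pass by joining with a comma-space separator after rstripping trailing punctuation from every element but the last; A runs left-to-right, re-rstripping and re-concatenating the accumulated merged string in place.
import Mathlib
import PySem

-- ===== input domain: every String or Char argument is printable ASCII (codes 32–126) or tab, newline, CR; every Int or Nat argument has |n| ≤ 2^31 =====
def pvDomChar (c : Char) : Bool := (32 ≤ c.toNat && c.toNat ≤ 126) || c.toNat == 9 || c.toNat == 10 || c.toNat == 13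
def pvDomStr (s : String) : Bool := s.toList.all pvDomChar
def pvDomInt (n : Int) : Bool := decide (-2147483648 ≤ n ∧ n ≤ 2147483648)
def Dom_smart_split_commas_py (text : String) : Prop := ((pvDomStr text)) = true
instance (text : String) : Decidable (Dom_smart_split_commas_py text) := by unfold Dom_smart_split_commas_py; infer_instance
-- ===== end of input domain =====

-- B builds the groups back-to-front (right-to-left pass testing the absorbed group's head, reversed accumulators), then renders each group in a second pass; same result as A's left-to-right in-place merge.


-- ===== PORT A =====
-- shared module-level constants of Source A / Source B
def pvPunct : List Char := [' ', '\t', '\r', '\n', ';', ':', '.', '!', '?']   -- _TRAILING_PUNCT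

def pvContStarts : List (List Char) :=                                        -- _CONTINUATION_STARTS
  ["particularly", "especially", "including", "such", "e.g.", "eg", "i.e.", "ie",
   "in", "on", "of", "with", "without", "and", "or", "when", "during", "after",
   "at", "around", "near", "associated", "often", "like", "typically"].map String.toList

-- hand port of s.rstrip(_TRAILING_PUNCT): PySem.Chars.rstrip strips only whitespace, so we
-- drop trailing chars of the set by hand — exact (Python removes the longest trailing run of chars of the set)
def pvRstripPunct (cs : List Char) : List Char :=
  (cs.reverse.dropWhile (fun c => pvPunct.contains c)).reverse

-- hand port of part[:1].islower(): part[:1] is at most one char, and for a one-char ASCII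
-- string s, s.islower() is exactly PySem.Chars.islower of that char ('' is False) — exact on Dom
def pvHeadIslower (cs : List Char) : Bool :=
  match cs with | [] => false | c :: _ => PySem.Chars.islower c

-- _looks_like_phrase: len(s.split()) >= 3
def pvLooksLikePhrase (s : List Char) : Bool := decide (3 ≤ (PySem.Chars.split₀ s).length)

-- the is_continuation test (token0 = part.strip().split(" ", 1)[0].lower();
-- split(...) always returns a non-empty list, so [0] is .headD [])
def pvIsCont (part : List Char) : Bool :=
  let token0 := PySem.Chars.lower ((PySem.Chars.splitOnMax (PySem.Chars.strip part) [' '] 1).headD [])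
  pvContStarts.contains token0 || (pvHeadIslower part && pvLooksLikePhrase part)

-- one iteration of A's merge loop (merged[-1] rewrite / append)
def pvMergeStep (merged : List (List Char)) (part : List Char) : List (List Char) :=
  if !merged.isEmpty && pvIsCont part then
    merged.dropLast ++ [pvRstripPunct (merged.getLastD []) ++ [',', ' '] ++ part]
  else merged ++ [part]

def smart_split_commas_py (text : String) : List String :=
  let raw_parts := (PySem.Chars.splitOn text.toList [',']).map PySem.Chars.strip
  let raw_parts := raw_parts.filter (fun p => !p.isEmpty)
  (raw_parts.foldl pvMergeStep []).map String.ofList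

-- ===== PORT B =====
-- body of Source B's reversed loop: rev_groups holds groups right-to-left, each group's parts
-- right-to-left; a part joins the last (i.e. leftmost-so-far) group when that group's first
-- element (= its last stored element) is a continuation
def pvRevStep (rev_groups : List (List (List Char))) (part : List Char) : List (List (List Char)) :=
  if !rev_groups.isEmpty && pvIsCont ((rev_groups.getLastD []).getLastD []) then
    rev_groups.dropLast ++ [rev_groups.getLastD [] ++ [part]]
  else rev_groups ++ [[part]]

-- _render of Source B on a forward-ordered group: comma-space join of [p.rstrip(_TRAILING_PUNCT) for p in g[:-1]] + g[-1:]
def pvRenderGroup (g : List (List Char)) : List Char :=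
  PySem.Chars.join [',', ' ']
    ((PySem.List.slice g none (some (-1))).map pvRstripPunct ++ PySem.List.slice g (some (-1)) none)

def smart_split_commas_py_alt (text : String) : List String :=
  let parts := ((PySem.Chars.splitOn text.toList [',']).map PySem.Chars.strip).filter (fun p => !p.isEmpty)
  ((parts.reverse.foldl pvRevStep []).reverse).map (fun g => String.ofList (pvRenderGroup g.reverse))

-- ===== PRECONDITION & SPEC =====
def Spec_smart_split_commas_py (text : String) (out : List String) : Prop := out = smart_split_commas_py_alt text
instance (text : String) (out : List String) : Decidable (Spec_smart_split_commas_py text out) := by unfold Spec_smart_split_commas_py; infer_instance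

-- ===== CLAIM (what is proved, stated in full; the proofs are below) =====
def Claim_equal_smart_split_commas_py : Prop := ∀ (text : String), Dom_smart_split_commas_py text → Spec_smart_split_commas_py text (smart_split_commas_py text)

-- ===== LEMMAS AND PROOFS =====

theorem pvRstripPunct_eq_nil_iff (p : List Char) :
    pvRstripPunct p = [] ↔ ∀ c ∈ p, pvPunct.contains c = true := by
  simp [pvRstripPunct, List.dropWhile_eq_nil_iff]

theorem pvRstripPunct_append (a b : List Char) (h : pvRstripPunct b ≠ []) :
    pvRstripPunct (a ++ b) = a ++ pvRstripPunct b := by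
  have hb : b.reverse.dropWhile (fun c => pvPunct.contains c) ≠ [] := by
    simpa [pvRstripPunct] using h
  simp only [pvRstripPunct, List.reverse_append, List.dropWhile_append]
  rw [if_neg (by simpa [List.isEmpty_iff] using hb)]
  simp

theorem pvMem_strip {c : Char} {s : List Char} (h : c ∈ PySem.Chars.strip s) : c ∈ s := by
  have h1 : c ∈ PySem.Chars.lstrip s := by
    have := List.mem_reverse.mpr ((List.dropWhile_sublist (l := (PySem.Chars.lstrip s).reverse) PySem.Chars.isspace).mem (by simpa [PySem.Chars.strip, PySem.Chars.rstrip, List.mem_reverse] using h))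
    simpa using this
  exact (List.dropWhile_sublist (l := s) PySem.Chars.isspace).mem h1

theorem pvGoHeadAcc (fuel : ℕ) : ∀ (m : ℕ) (l cur : List Char) (as : List (List Char)) (a : List Char),
    (PySem.Chars.splitOnMax.go [' '] fuel m l cur (as ++ [a])).headD [] = a := by
  induction fuel with
  | zero => intro m l cur as a; simp [PySem.Chars.splitOnMax.go]
  | succ n ih =>
    intro m l cur as a
    cases l with
    | nil => simp [PySem.Chars.splitOnMax.go]
    | cons c rest =>
      by_cases hm : m = 0
      · subst hm; simp [PySem.Chars.splitOnMax.go]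
      · by_cases hp : [' '].isPrefixOf (c :: rest) = true
        · rw [PySem.Chars.splitOnMax.go]
          simp only [if_neg hm, if_pos hp]
          have := ih (m-1) (List.drop 1 (c :: rest)) [] (cur.reverse :: as) a
          simpa using this
        · rw [PySem.Chars.splitOnMax.go]
          simp only [if_neg hm, if_neg hp]
          exact ih m rest (c :: cur) as a

theorem pvGoHead (fuel : ℕ) : ∀ (l cur : List Char), l.length < fuel →
    (PySem.Chars.splitOnMax.go [' '] fuel 1 l cur []).headD []
      = cur.reverse ++ l.takeWhile (fun c => !(c == ' ')) := by
  induction fuel with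
  | zero => intro l cur h; exact absurd h (Nat.not_lt_zero _)
  | succ n ih =>
    intro l cur h
    cases l with
    | nil => simp [PySem.Chars.splitOnMax.go]
    | cons c rest =>
      by_cases hp : [' '].isPrefixOf (c :: rest) = true
      · have hc : c = ' ' := ((by simpa [List.isPrefixOf] using hp : ' ' = c)).symm
        rw [PySem.Chars.splitOnMax.go]
        simp only [if_neg (by norm_num : ¬ (1:ℕ) = 0), if_pos hp]
        have := pvGoHeadAcc n 0 (List.drop [' '].length (c :: rest)) [] [] cur.reverse
        simpa [hc] using this
      · have hc : ¬ c = ' ' := fun h' => (by simpa [List.isPrefixOf] using hp : ¬ ' ' = c) h'.symm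
        rw [PySem.Chars.splitOnMax.go]
        simp only [if_neg (by norm_num : ¬ (1:ℕ) = 0), if_neg hp]
        rw [ih rest (c :: cur) (by simpa using Nat.lt_of_succ_lt_succ h)]
        simp [hc]

theorem pvPunct_lowerChar {c : Char} (h : c ∈ pvPunct) : PySem.Chars.lowerChar c = c := by
  simp [pvPunct] at h
  rcases h with rfl|rfl|rfl|rfl|rfl|rfl|rfl|rfl|rfl <;> decide

theorem pvPunct_not_islower {c : Char} (h : c ∈ pvPunct) : PySem.Chars.islower c = false := by
  simp [pvPunct] at h
  rcases h with rfl|rfl|rfl|rfl|rfl|rfl|rfl|rfl|rfl <;> decide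

theorem pvContHead : ∀ w ∈ pvContStarts, w ≠ [] ∧ pvPunct.contains (w.headD ' ') = false := by
  decide

theorem pvIsCont_rstrip_ne (part : List Char) (h : pvIsCont part = true) : pvRstripPunct part ≠ [] := by
  intro hnil
  have hall : ∀ c ∈ part, pvPunct.contains c = true := (pvRstripPunct_eq_nil_iff part).mp hnil
  unfold pvIsCont at h
  simp only [Bool.or_eq_true, Bool.and_eq_true] at h
  rcases h with h | ⟨h1, _⟩
  · -- token0 ∈ _CONTINUATION_STARTS
    set s := PySem.Chars.strip part with hs
    have hhead : (PySem.Chars.splitOnMax s [' '] 1).headD [] = s.takeWhile (fun c => !(c == ' ')) := by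
      rw [PySem.Chars.splitOnMax]
      rw [if_neg (by norm_num)]
      simpa using pvGoHead (s.length + 1) s [] (Nat.lt_succ_self _)
    rw [hhead] at h
    have hmem : PySem.Chars.lower (s.takeWhile (fun c => !(c == ' '))) ∈ pvContStarts := by
      simpa using h
    obtain ⟨hne, hhd⟩ := pvContHead _ hmem
    cases htw : s.takeWhile (fun c => !(c == ' ')) with
    | nil => rw [htw] at hne; simp [PySem.Chars.lower] at hne
    | cons d tl =>
      have hd_s : d ∈ s := (List.takeWhile_sublist _).mem (by rw [htw]; simp)
      have hd_p : d ∈ part := pvMem_strip hd_s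
      have hd_punct : d ∈ pvPunct := by simpa using hall d hd_p
      rw [htw] at hhd
      simp [PySem.Chars.lower, pvPunct_lowerChar hd_punct] at hhd
      exact absurd (by simpa using hd_punct) (by simpa using hhd)
  · -- part[:1].islower()
    cases part with
    | nil => simp [pvHeadIslower] at h1
    | cons c cs =>
      have hc : c ∈ pvPunct := by simpa using hall c (by simp)
      rw [pvHeadIslower] at h1
      rw [pvPunct_not_islower hc] at h1
      exact Bool.false_ne_true h1

-- A's incremental merged string of a group (proof-only)
def pvRenderInc (g : List (List Char)) : List Char :=
  match g with
  | [] => []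
  | p :: ps => ps.foldl (fun acc q => pvRstripPunct acc ++ [',', ' '] ++ q) p

-- forward group step (proof-only bridge between the two traversals)
def pvGStep (groups : List (List (List Char))) (part : List Char) : List (List (List Char)) :=
  if !groups.isEmpty && pvIsCont part then groups.dropLast ++ [groups.getLastD [] ++ [part]]
  else groups ++ [[part]]

-- recursive right-to-left grouping (proof-only bridge)
def pvGroup : List (List Char) → List (List (List Char))
  | [] => []
  | p :: ps =>
    let r := pvGroup ps
    if r ≠ [] ∧ pvIsCont ((r.headD []).headD []) = true then (p :: r.headD []) :: r.tail
    else [p] :: r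

theorem pvDropLastSlice (g : List (List Char)) : PySem.List.slice g none (some (-1)) = g.dropLast := by
  simp [pysem]

theorem pvLastSlice (g : List (List Char)) (h : g ≠ []) :
    PySem.List.slice g (some (-1)) none = [g.getLastD []] := by
  simp [pysem, List.getLastD_eq_getLast?]
  induction g with
  | nil => simp at h
  | cons a t ih =>
    cases t with
    | nil => simp
    | cons b t2 => simpa using ih (by simp)

theorem pvRenderGroup_eq (g : List (List Char)) (h : g ≠ []) :
    pvRenderGroup g = PySem.Chars.join [',', ' '] (g.dropLast.map pvRstripPunct ++ [g.getLastD []]) := by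
  rw [pvRenderGroup, pvDropLastSlice, pvLastSlice g h]

theorem pvRender_eq (ps : List (List Char)) : ∀ p0, (∀ p ∈ ps, pvRstripPunct p ≠ []) →
    pvRenderInc (p0 :: ps) = pvRenderGroup (p0 :: ps) := by
  induction ps with
  | nil =>
    intro p0 _
    rw [pvRenderGroup_eq _ (by simp)]
    simp [pvRenderInc, PySem.Chars.join_singleton]
  | cons q rest ih =>
    intro p0 hne
    have hq : pvRstripPunct q ≠ [] := hne q (by simp)
    have hrest : ∀ p ∈ rest, pvRstripPunct p ≠ [] := fun p hp => hne p (by simp [hp])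
    have step : pvRenderInc (p0 :: q :: rest) = pvRenderInc ((pvRstripPunct p0 ++ [',', ' '] ++ q) :: rest) := by
      simp [pvRenderInc, List.foldl_cons]
    rw [step, ih _ hrest]
    rw [pvRenderGroup_eq _ (by simp), pvRenderGroup_eq _ (by simp)]
    cases rest with
    | nil =>
      simp only [List.dropLast, List.map_cons, List.map_nil, List.getLastD_eq_getLast?]
      simp [PySem.Chars.join_singleton, PySem.Chars.join_cons_cons]
    | cons r rs =>
      have hd1 : ((pvRstripPunct p0 ++ [',', ' '] ++ q) :: r :: rs).dropLast
          = (pvRstripPunct p0 ++ [',', ' '] ++ q) :: (r :: rs).dropLast := rfl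
      have hd2 : (p0 :: q :: r :: rs).dropLast = p0 :: q :: (r :: rs).dropLast := rfl
      rw [hd1, hd2]
      simp only [List.map_cons, List.cons_append, List.getLastD_eq_getLast?, List.getLast?_cons_cons]
      rw [pvRstripPunct_append _ _ hq]
      cases hmap : (List.map pvRstripPunct (r :: rs).dropLast ++ [(r :: rs).getLast?.getD []]) with
      | nil => simp at hmap
      | cons y ys =>
        rw [PySem.Chars.join_cons_cons, PySem.Chars.join_cons_cons, PySem.Chars.join_cons_cons]
        simp

def pvGood (groups : List (List (List Char))) : Prop :=
  ∀ g ∈ groups, g ≠ [] ∧ ∀ p ∈ g.tail, pvRstripPunct p ≠ []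

theorem pvRenderInc_append (g : List (List Char)) (hg : g ≠ []) (part : List Char) :
    pvRenderInc (g ++ [part]) = pvRstripPunct (pvRenderInc g) ++ [',', ' '] ++ part := by
  cases g with
  | nil => simp at hg
  | cons p0 ps => simp [pvRenderInc, List.foldl_append]

theorem pvStep_eq (groups : List (List (List Char))) (part : List Char) (hg : pvGood groups) :
    pvMergeStep (groups.map pvRenderInc) part = (pvGStep groups part).map pvRenderInc
    ∧ pvGood (pvGStep groups part) := by
  unfold pvGStep
  by_cases hc : (!groups.isEmpty && pvIsCont part) = true
  · rw [if_pos hc]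
    obtain ⟨hne, hcont⟩ := Bool.and_eq_true_iff.mp hc
    have hgne : groups ≠ [] := by simp at hne; exact hne
    obtain ⟨gs, g, rfl⟩ := (List.eq_nil_or_concat groups).resolve_left hgne
    simp only [List.concat_eq_append] at hg hne hgne ⊢
    have hgmem : g ∈ gs ++ [g] := by simp
    obtain ⟨hgnil, hgtail⟩ := hg g hgmem
    constructor
    · rw [pvMergeStep]
      rw [if_pos (by simp [hcont])]
      have e1 : List.map pvRenderInc (gs ++ [g]) = List.map pvRenderInc gs ++ [pvRenderInc g] := by simp
      simp only [e1, List.dropLast_concat, List.getLastD_concat]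
      simp [pvRenderInc_append g hgnil part]
    · intro g' hg'
      rw [List.dropLast_concat] at hg'
      rcases List.mem_append.mp hg' with h' | h'
      · exact hg g' (by simp [List.mem_append.mpr (Or.inl h')])
      · have : g' = g ++ [part] := by simpa using h'
        subst this
        refine ⟨by simp [hgnil], ?_⟩
        cases g with
        | nil => simp at hgnil
        | cons p0 ps =>
          intro p hp
          simp only [List.cons_append, List.tail_cons] at hp
          rcases List.mem_append.mp hp with h'' | h''
          · exact hgtail p h''
          · have : p = part := by simpa using h''
            subst this
            exact pvIsCont_rstrip_ne _ hcont
  · rw [if_neg hc]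
    constructor
    · rw [pvMergeStep]
      rw [if_neg (by simpa [List.isEmpty_iff, List.map_eq_nil_iff] using hc)]
      simp [pvRenderInc]
    · intro g' hg'
      rcases List.mem_append.mp hg' with h' | h'
      · exact hg g' h'
      · have : g' = [part] := by simpa using h'
        subst this
        exact ⟨by simp, by simp⟩

theorem pvFoldA (parts : List (List Char)) : ∀ groups, pvGood groups →
    parts.foldl pvMergeStep (groups.map pvRenderInc) = (parts.foldl pvGStep groups).map pvRenderInc
    ∧ pvGood (parts.foldl pvGStep groups) := by
  induction parts with
  | nil => intro groups hg; exact ⟨rfl, hg⟩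
  | cons p rest ih =>
    intro groups hg
    obtain ⟨h1, h2⟩ := pvStep_eq groups p hg
    refine ⟨?_, ?_⟩
    · simp only [List.foldl_cons]
      rw [h1]
      exact (ih _ h2).1
    · simp only [List.foldl_cons]
      exact (ih _ h2).2

theorem pvGroup_ne_nil (parts : List (List Char)) : ∀ g ∈ pvGroup parts, g ≠ [] := by
  induction parts with
  | nil => simp [pvGroup]
  | cons p ps ih =>
    intro g hg
    simp only [pvGroup] at hg
    split_ifs at hg with hc
    · rcases List.mem_cons.mp hg with rfl | h'
      · simp
      · exact ih g (List.tail_sublist _ |>.mem h')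
    · rcases List.mem_cons.mp hg with rfl | h'
      · simp
      · exact ih g h'

theorem pvGroup_concat (xs : List (List Char)) (p : List Char) :
    pvGroup (xs ++ [p]) = pvGStep (pvGroup xs) p := by
  induction xs with
  | nil => simp [pvGroup, pvGStep]
  | cons x xs ih =>
    rw [List.cons_append]
    simp only [pvGroup]
    rw [ih]
    cases hG : pvGroup xs with
    | nil => by_cases hp : pvIsCont p = true <;> simp [pvGStep, hp]
    | cons g gs =>
      have hgne : g ≠ [] := pvGroup_ne_nil xs g (hG ▸ List.mem_cons_self)
      obtain ⟨a, t, rfl⟩ : ∃ a t, g = a :: t := by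
        cases g with
        | nil => exact absurd rfl hgne
        | cons a t => exact ⟨a, t, rfl⟩
      by_cases hp : pvIsCont p = true
      · cases gs with
        | nil =>
          by_cases ha : pvIsCont a = true <;>
            simp [pvGStep, hp, ha, List.dropLast, List.getLastD]
        | cons g2 gs2 =>
          have h1 : pvGStep ((a :: t) :: g2 :: gs2) p
              = (a :: t) :: ((g2 :: gs2).dropLast ++ [(g2 :: gs2).getLastD [] ++ [p]]) := by
            simp [pvGStep, hp, List.getLastD_eq_getLast?]
          rw [h1]
          by_cases ha : pvIsCont a = true <;>
            simp [pvGStep, hp, ha, List.getLastD_eq_getLast?]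
      · by_cases ha : pvIsCont a = true <;> simp [pvGStep, hp, ha]

theorem pvGroup_eq_fold (parts : List (List Char)) :
    pvGroup parts = parts.foldl pvGStep [] := by
  induction parts using List.reverseRecOn with
  | nil => rfl
  | append_singleton xs p ih =>
    rw [pvGroup_concat, ih, List.foldl_append]
    rfl

-- the reversed fold of B equals pvGroup with both levels reversed
theorem pvRev_eq (parts : List (List Char)) :
    parts.reverse.foldl pvRevStep [] = ((pvGroup parts).map List.reverse).reverse := by
  induction parts with
  | nil => rfl
  | cons p ps ih =>
    have h1 : (p :: ps).reverse = ps.reverse ++ [p] := by simp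
    rw [h1, List.foldl_append, List.foldl_cons, List.foldl_nil, ih]
    simp only [pvGroup]
    cases hps : pvGroup ps with
    | nil => simp [pvRevStep]
    | cons g gs =>
      have hgne : g ≠ [] := pvGroup_ne_nil ps g (hps ▸ List.mem_cons_self)
      obtain ⟨a, t, rfl⟩ : ∃ a t, g = a :: t := by
        cases g with
        | nil => exact absurd rfl hgne
        | cons a t => exact ⟨a, t, rfl⟩
      have hlast : ((List.map List.reverse gs).reverse ++ [(a :: t).reverse]).getLastD [] = (a :: t).reverse := by
        rw [List.getLastD_concat]
      have hlast2 : (a :: t).reverse.getLastD [] = a := by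
        rw [List.reverse_cons, List.getLastD_concat]
      unfold pvRevStep
      rw [List.map_cons, List.reverse_cons, hlast, hlast2]
      by_cases hc : pvIsCont a = true
      · rw [if_pos (by simp [hc])]
        simp [hc]
      · rw [if_neg (by simp [hc])]
        simp [hc]

theorem pvPorts_eq : ∀ (text : String),
    smart_split_commas_py text = smart_split_commas_py_alt text := by
  intro text
  simp only [smart_split_commas_py, smart_split_commas_py_alt]
  set parts := ((PySem.Chars.splitOn text.toList [',']).map PySem.Chars.strip).filter (fun p => !p.isEmpty) with hp
  obtain ⟨h1, h2⟩ := pvFoldA parts [] (by intro g hg; simp at hg)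
  simp only [List.map_nil] at h1
  rw [h1, pvRev_eq, ← pvGroup_eq_fold]
  rw [List.reverse_reverse, List.map_map, List.map_map]
  refine List.map_congr_left ?_
  intro g hgmem
  rw [← pvGroup_eq_fold] at h2
  obtain ⟨hgne, hgtail⟩ := h2 g hgmem
  cases g with
  | nil => simp at hgne
  | cons p0 ps =>
    have := pvRender_eq ps p0 (fun p hp => hgtail p hp)
    simp [Function.comp, this]

-- ===== VERDICT (by name: the statement is the Claim_ definition above) =====
theorem smart_split_commas_py_spec : Claim_equal_smart_split_commas_py := by
  intro text _
  exact pvPorts_eq text
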